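-- pv_equiv track=rewrite | github.com/madun1999/compprog | Codeforce UCSD fa21 W10/E.py | par_val
-- ===== SOURCE A (Python) =====
-- MOD = 10 ** 9 + 7
--
-- def par_val(node1, node2):
--     if node1 == node2 == None:
--         return [1 for _ in range(7)]
--     if node1 == None or node2 == None:
--         node = node1 if node2 == None else node2
--         ret = [0 for _ in range(7)]
--         for x in range(1, 7):
--             for y in range(1, 7):
--                 if x == y or x + y == 7:
--                     continue
--                 ret[x] = (ret[x] + (node[y]) % MOD) % MOD
--         return ret
--     ret = [0 for _ in range(7)]
--     for x in range(1, 7): # par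
--         for y in range(1, 7): # node1
--             if x == y or x + y == 7:
--                 continue
--             for z in range(1, 7): #node2
--                 if x == z or x + z == 7:
--                     continue
--                 ret[x] = (ret[x] + (node1[y] * node2[z]) % MOD) % MOD
--     return ret
-- ===== SOURCE B (Python) =====
-- MOD = 10 ** 9 + 7
--
-- def _s(node, x):
--     # sum of the allowed faces of one node, reduced mod MOD
--     return sum(node[y] for y in range(1, 7) if y != x and x + y != 7) % MOD
--
-- def par_val(node1, node2):
--     if node1 == node2 == None:
--         return [1] * 7
--     if node1 is None or node2 is None:
--         node = node1 if node2 is None else node2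
--         return [0] + [_s(node, x) for x in range(1, 7)]
--     return [0] + [_s(node1, x) * _s(node2, x) % MOD for x in range(1, 7)]
-- ===== Notes on version B (the rewrite author's own statement) =====
-- stated objective: simpler
-- what changed: The triple-nested accumulation loop is replaced by one shared helper computing each node's allowed-face sum mod MOD once per x, multiplying the two factored sums; lists are built by comprehension instead of in-place index updates.
import Mathlib
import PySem

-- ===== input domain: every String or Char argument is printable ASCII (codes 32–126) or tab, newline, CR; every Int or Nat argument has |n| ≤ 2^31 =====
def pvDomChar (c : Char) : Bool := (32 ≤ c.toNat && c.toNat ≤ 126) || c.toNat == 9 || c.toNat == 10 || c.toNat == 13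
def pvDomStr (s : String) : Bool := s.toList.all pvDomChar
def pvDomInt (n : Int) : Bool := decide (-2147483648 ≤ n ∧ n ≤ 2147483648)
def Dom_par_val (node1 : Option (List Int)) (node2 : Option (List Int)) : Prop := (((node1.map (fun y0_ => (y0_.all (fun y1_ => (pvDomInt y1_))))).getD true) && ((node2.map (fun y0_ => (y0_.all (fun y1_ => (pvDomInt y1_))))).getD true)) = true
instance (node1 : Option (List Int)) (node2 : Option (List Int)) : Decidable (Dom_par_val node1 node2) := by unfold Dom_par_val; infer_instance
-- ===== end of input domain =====

-- B replaces A's in-place triple-nested accumulation loop by per-x factored allowed-face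
-- sums (one mod-reduced sum per node, multiplied), building the result by comprehension.

-- ===== PORT A =====
def par_val (node1 : Option (List Int)) (node2 : Option (List Int)) : List Int :=
  if node1 = node2 ∧ node2 = none then
    (PySem.List.pyRange 0 7 1).map (fun _ => (1 : Int))
  else if node1 = none ∨ node2 = none then
    let node := if node2 = none then node1.getD [] else node2.getD []
    let ret := (PySem.List.pyRange 0 7 1).map (fun _ => (0 : Int))
    (PySem.List.pyRange 1 7 1).foldl (fun ret x =>
      (PySem.List.pyRange 1 7 1).foldl (fun ret y =>
        if x = y ∨ x + y = 7 then ret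
        else PySem.List.pySetD ret x
          (PySem.Int.mod (PySem.List.pyGetD ret x 0 +
            PySem.Int.mod (PySem.List.pyGetD node y 0) 1000000007) 1000000007)) ret) ret
  else
    let n1 := node1.getD []
    let n2 := node2.getD []
    let ret := (PySem.List.pyRange 0 7 1).map (fun _ => (0 : Int))
    (PySem.List.pyRange 1 7 1).foldl (fun ret x =>
      (PySem.List.pyRange 1 7 1).foldl (fun ret y =>
        if x = y ∨ x + y = 7 then ret
        else (PySem.List.pyRange 1 7 1).foldl (fun ret z =>
          if x = z ∨ x + z = 7 then ret
          else PySem.List.pySetD ret x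
            (PySem.Int.mod (PySem.List.pyGetD ret x 0 +
              PySem.Int.mod (PySem.List.pyGetD n1 y 0 * PySem.List.pyGetD n2 z 0) 1000000007) 1000000007)) ret) ret) ret

-- ===== PORT B =====
-- helper `_s` of Source B: allowed-face sum of one node, reduced mod MOD
def pvAllowedSum (node : List Int) (x : Int) : Int :=
  PySem.Int.mod ((((PySem.List.pyRange 1 7 1).filter
    (fun y => y ≠ x ∧ x + y ≠ 7)).map (fun y => PySem.List.pyGetD node y 0)).sum) 1000000007

def par_val_alt (node1 : Option (List Int)) (node2 : Option (List Int)) : List Int :=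
  if node1 = node2 ∧ node2 = none then
    List.replicate 7 (1 : Int)
  else if node1 = none ∨ node2 = none then
    let node := if node2 = none then node1.getD [] else node2.getD []
    0 :: (PySem.List.pyRange 1 7 1).map (fun x => pvAllowedSum node x)
  else
    0 :: (PySem.List.pyRange 1 7 1).map (fun x =>
      PySem.Int.mod (pvAllowedSum (node1.getD []) x * pvAllowedSum (node2.getD []) x) 1000000007)

-- ===== PRECONDITION & SPEC =====
-- Pre_ excludes exactly the inputs where the Python A raises IndexError: a present node
-- list shorter than 7 (A reads node[1]..node[6]).
def Pre_par_val (node1 : Option (List Int)) (node2 : Option (List Int)) : Prop :=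
  (∀ l, node1 = some l → 7 ≤ l.length) ∧ (∀ l, node2 = some l → 7 ≤ l.length)
instance (node1 : Option (List Int)) (node2 : Option (List Int)) : Decidable (Pre_par_val node1 node2) := by unfold Pre_par_val; infer_instance

def pvWitness_par_val : Option (List Int) × Option (List Int) :=
  (some [0, 1, 2, 3, 4, 5, 6], some [9, 8, 7, 6, 5, 4, 3])

def Spec_par_val (node1 : Option (List Int)) (node2 : Option (List Int)) (out : List Int) : Prop := out = par_val_alt node1 node2
instance (node1 : Option (List Int)) (node2 : Option (List Int)) (out : List Int) : Decidable (Spec_par_val node1 node2 out) := by unfold Spec_par_val; infer_instance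

-- ===== CLAIM (what is proved, stated in full; the proofs are below) =====
def Claim_equal_par_val : Prop := ∀ (node1 : Option (List Int)) (node2 : Option (List Int)), Dom_par_val node1 node2 → Pre_par_val node1 node2 → Spec_par_val node1 node2 (par_val node1 node2)

-- ===== LEMMAS AND PROOFS =====

theorem pv_exists7 {l : List Int} (h : 7 ≤ l.length) :
    ∃ a b c d e f g t, l = a :: b :: c :: d :: e :: f :: g :: t := by
  match l, h with
  | a :: b :: c :: d :: e :: f :: g :: t, _ => exact ⟨a, b, c, d, e, f, g, t, rfl⟩

theorem pv_range16 : PySem.List.pyRange 1 7 1 = [1, 2, 3, 4, 5, 6] := by decide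

theorem pv_ret0 : (PySem.List.pyRange 0 7 1).map (fun _ => (0 : Int)) = [0, 0, 0, 0, 0, 0, 0] := by decide

theorem pvGet1 (r0 r1 r2 r3 r4 r5 r6 : Int) (t : List Int) :
    PySem.List.pyGetD (r0::r1::r2::r3::r4::r5::r6::t) (1:Int) 0 = r1 := by
  rw [PySem.List.pyGetD_ofNat']; rfl

theorem pvGet2 (r0 r1 r2 r3 r4 r5 r6 : Int) (t : List Int) :
    PySem.List.pyGetD (r0::r1::r2::r3::r4::r5::r6::t) (2:Int) 0 = r2 := by
  rw [PySem.List.pyGetD_ofNat']; rfl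

theorem pvGet3 (r0 r1 r2 r3 r4 r5 r6 : Int) (t : List Int) :
    PySem.List.pyGetD (r0::r1::r2::r3::r4::r5::r6::t) (3:Int) 0 = r3 := by
  rw [PySem.List.pyGetD_ofNat']; rfl

theorem pvGet4 (r0 r1 r2 r3 r4 r5 r6 : Int) (t : List Int) :
    PySem.List.pyGetD (r0::r1::r2::r3::r4::r5::r6::t) (4:Int) 0 = r4 := by
  rw [PySem.List.pyGetD_ofNat']; rfl

theorem pvGet5 (r0 r1 r2 r3 r4 r5 r6 : Int) (t : List Int) :
    PySem.List.pyGetD (r0::r1::r2::r3::r4::r5::r6::t) (5:Int) 0 = r5 := by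
  rw [PySem.List.pyGetD_ofNat']; rfl

theorem pvGet6 (r0 r1 r2 r3 r4 r5 r6 : Int) (t : List Int) :
    PySem.List.pyGetD (r0::r1::r2::r3::r4::r5::r6::t) (6:Int) 0 = r6 := by
  rw [PySem.List.pyGetD_ofNat']; rfl

theorem pvSet1 (r0 r1 r2 r3 r4 r5 r6 v : Int) :
    PySem.List.pySetD [r0,r1,r2,r3,r4,r5,r6] (1:Int) v = [r0,v,r2,r3,r4,r5,r6] := rfl

theorem pvSet2 (r0 r1 r2 r3 r4 r5 r6 v : Int) :
    PySem.List.pySetD [r0,r1,r2,r3,r4,r5,r6] (2:Int) v = [r0,r1,v,r3,r4,r5,r6] := rfl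

theorem pvSet3 (r0 r1 r2 r3 r4 r5 r6 v : Int) :
    PySem.List.pySetD [r0,r1,r2,r3,r4,r5,r6] (3:Int) v = [r0,r1,r2,v,r4,r5,r6] := rfl

theorem pvSet4 (r0 r1 r2 r3 r4 r5 r6 v : Int) :
    PySem.List.pySetD [r0,r1,r2,r3,r4,r5,r6] (4:Int) v = [r0,r1,r2,r3,v,r5,r6] := rfl

theorem pvSet5 (r0 r1 r2 r3 r4 r5 r6 v : Int) :
    PySem.List.pySetD [r0,r1,r2,r3,r4,r5,r6] (5:Int) v = [r0,r1,r2,r3,r4,v,r6] := rfl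

theorem pvSet6 (r0 r1 r2 r3 r4 r5 r6 v : Int) :
    PySem.List.pySetD [r0,r1,r2,r3,r4,r5,r6] (6:Int) v = [r0,r1,r2,r3,r4,r5,v] := rfl


-- the body of A's x-loop, as named functions (definitionally equal to the lambdas in par_val)
def pvStepT (n1 n2 : List Int) (ret : List Int) (x : Int) : List Int :=
  (PySem.List.pyRange 1 7 1).foldl (fun ret y =>
    if x = y ∨ x + y = 7 then ret
    else (PySem.List.pyRange 1 7 1).foldl (fun ret z =>
      if x = z ∨ x + z = 7 then ret
      else PySem.List.pySetD ret x
        (PySem.Int.mod (PySem.List.pyGetD ret x 0 +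
          PySem.Int.mod (PySem.List.pyGetD n1 y 0 * PySem.List.pyGetD n2 z 0) 1000000007) 1000000007)) ret) ret

def pvStepS (node : List Int) (ret : List Int) (x : Int) : List Int :=
  (PySem.List.pyRange 1 7 1).foldl (fun ret y =>
    if x = y ∨ x + y = 7 then ret
    else PySem.List.pySetD ret x
      (PySem.Int.mod (PySem.List.pyGetD ret x 0 +
        PySem.Int.mod (PySem.List.pyGetD node y 0) 1000000007) 1000000007)) ret

theorem pvT1 (a b c d e f g : Int) (t : List Int) (a' b' c' d' e' f' g' : Int) (t' : List Int) :
    pvStepT (a::b::c::d::e::f::g::t) (a'::b'::c'::d'::e'::f'::g'::t') [0, 0, 0, 0, 0, 0, 0] 1 = [0, (c * c' + c * d' + c * e' + c * f' + d * c' + d * d' + d * e' + d * f' + e * c' + e * d' + e * e' + e * f' + f * c' + f * d' + f * e' + f * f') % 1000000007, 0, 0, 0, 0, 0] := by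
  unfold pvStepT
  norm_num [pv_range16, pvGet1, pvGet2, pvGet3, pvGet4, pvGet5, pvGet6,
    pvSet1, pvSet2, pvSet3, pvSet4, pvSet5, pvSet6]

theorem pvT2 (a b c d e f g : Int) (t : List Int) (a' b' c' d' e' f' g' : Int) (t' : List Int) :
    pvStepT (a::b::c::d::e::f::g::t) (a'::b'::c'::d'::e'::f'::g'::t') [0, (c * c' + c * d' + c * e' + c * f' + d * c' + d * d' + d * e' + d * f' + e * c' + e * d' + e * e' + e * f' + f * c' + f * d' + f * e' + f * f') % 1000000007, 0, 0, 0, 0, 0] 2 = [0, (c * c' + c * d' + c * e' + c * f' + d * c' + d * d' + d * e' + d * f' + e * c' + e * d' + e * e' + e * f' + f * c' + f * d' + f * e' + f * f') % 1000000007, (b * b' + b * d' + b * e' + b * g' + d * b' + d * d' + d * e' + d * g' + e * b' + e * d' + e * e' + e * g' + g * b' + g * d' + g * e' + g * g') % 1000000007, 0, 0, 0, 0] := by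
  unfold pvStepT
  norm_num [pv_range16, pvGet1, pvGet2, pvGet3, pvGet4, pvGet5, pvGet6,
    pvSet1, pvSet2, pvSet3, pvSet4, pvSet5, pvSet6]

theorem pvT3 (a b c d e f g : Int) (t : List Int) (a' b' c' d' e' f' g' : Int) (t' : List Int) :
    pvStepT (a::b::c::d::e::f::g::t) (a'::b'::c'::d'::e'::f'::g'::t') [0, (c * c' + c * d' + c * e' + c * f' + d * c' + d * d' + d * e' + d * f' + e * c' + e * d' + e * e' + e * f' + f * c' + f * d' + f * e' + f * f') % 1000000007, (b * b' + b * d' + b * e' + b * g' + d * b' + d * d' + d * e' + d * g' + e * b' + e * d' + e * e' + e * g' + g * b' + g * d' + g * e' + g * g') % 1000000007, 0, 0, 0, 0] 3 = [0, (c * c' + c * d' + c * e' + c * f' + d * c' + d * d' + d * e' + d * f' + e * c' + e * d' + e * e' + e * f' + f * c' + f * d' + f * e' + f * f') % 1000000007, (b * b' + b * d' + b * e' + b * g' + d * b' + d * d' + d * e' + d * g' + e * b' + e * d' + e * e' + e * g' + g * b' + g * d' + g * e' + g * g') % 1000000007, (b * b' + b * c' + b * f' + b * g' + c * b' + c * c'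 + c * f' + c * g' + f * b' + f * c' + f * f' + f * g' + g * b' + g * c' + g * f' + g * g') % 1000000007, 0, 0, 0] := by
  unfold pvStepT
  norm_num [pv_range16, pvGet1, pvGet2, pvGet3, pvGet4, pvGet5, pvGet6,
    pvSet1, pvSet2, pvSet3, pvSet4, pvSet5, pvSet6]

theorem pvT4 (a b c d e f g : Int) (t : List Int) (a' b' c' d' e' f' g' : Int) (t' : List Int) :
    pvStepT (a::b::c::d::e::f::g::t) (a'::b'::c'::d'::e'::f'::g'::t') [0, (c * c' + c * d' + c * e' + c * f' + d * c' + d * d' + d * e' + d * f' + e * c' + e * d' + e * e' + e * f' + f * c' + f * d' + f * e' + f * f') % 1000000007, (b * b' + b * d' + b * e' + b * g' + d * b' + d * d' + d * e' + d * g' + e * b' + e * d' + e * e' + e * g' + g * b' + g * d' + g * e' + g * g') % 1000000007, (b * b' + b * c' + b * f' + b * g' + c * b' + c * c' + c * f' + c * g' + f * b' + f * c' + f * f' + f * g' + g * b' + g * c' + g * f' + g * g') % 1000000007, 0, 0, 0] 4 = [0, (c * c' + c * d' + c * e' + c * f' + d * c' + d * d' + d * e' + d * f' + e * c' + e * d'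 + e * e' + e * f' + f * c' + f * d' + f * e' + f * f') % 1000000007, (b * b' + b * d' + b * e' + b * g' + d * b' + d * d' + d * e' + d * g' + e * b' + e * d' + e * e' + e * g' + g * b' + g * d' + g * e' + g * g') % 1000000007, (b * b' + b * c' + b * f' + b * g' + c * b' + c * c' + c * f' + c * g' + f * b' + f * c' + f * f' + f * g' + g * b' + g * c' + g * f' + g * g') % 1000000007, (b * b' + b * c' + b * f' + b * g' + c * b' + c * c' + c * f' + c * g' + f * b' + f * c' + f * f' + f * g' + g * b' + g * c' + g * f' + g * g') % 1000000007, 0, 0] := by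
  unfold pvStepT
  norm_num [pv_range16, pvGet1, pvGet2, pvGet3, pvGet4, pvGet5, pvGet6,
    pvSet1, pvSet2, pvSet3, pvSet4, pvSet5, pvSet6]

theorem pvT5 (a b c d e f g : Int) (t : List Int) (a' b' c' d' e' f' g' : Int) (t' : List Int) :
    pvStepT (a::b::c::d::e::f::g::t) (a'::b'::c'::d'::e'::f'::g'::t') [0, (c * c' + c * d' + c * e' + c * f' + d * c' + d * d' + d * e' + d * f' + e * c' + e * d' + e * e' + e * f' + f * c' + f * d' + f * e' + f * f') % 1000000007, (b * b' + b * d' + b * e' + b * g' + d * b' + d * d' + d * e' + d * g' + e * b' + e * d' + e * e' + e * g' + g * b' + g * d' + g * e' + g * g') % 1000000007, (b * b' + b * c' + b * f' + b * g' + c * b' + c * c' + c * f' + c * g' + f * b' + f * c' + f * f' + f * g' + g * b' + g * c' + g * f' + g * g') % 1000000007, (b * b' + b * c' + b * f' + b * g' + c * b' + c * c' + c * f' + c * g' + f * b' + f * c' + f * f' + f * g' + g * b' + g * c' + g * f' + g * g') % 1000000007, 0, 0] 5 = [0, (c * c' + c * d' + c * e' + c * f' + d * c' + d * d' + d * e'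 + d * f' + e * c' + e * d' + e * e' + e * f' + f * c' + f * d' + f * e' + f * f') % 1000000007, (b * b' + b * d' + b * e' + b * g' + d * b' + d * d' + d * e' + d * g' + e * b' + e * d' + e * e' + e * g' + g * b' + g * d' + g * e' + g * g') % 1000000007, (b * b' + b * c' + b * f' + b * g' + c * b' + c * c' + c * f' + c * g' + f * b' + f * c' + f * f' + f * g' + g * b' + g * c' + g * f' + g * g') % 1000000007, (b * b' + b * c' + b * f' + b * g' + c * b' + c * c' + c * f' + c * g' + f * b' + f * c' + f * f' + f * g' + g * b' + g * c' + g * f' + g * g') % 1000000007, (b * b' + b * d' + b * e' + b * g' + d * b' + d * d' + d * e' + d * g' + e * b' + e * d' + e * e' + e * g' + g * b' + g * d' + g * e' + g * g') % 1000000007, 0] := by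
  unfold pvStepT
  norm_num [pv_range16, pvGet1, pvGet2, pvGet3, pvGet4, pvGet5, pvGet6,
    pvSet1, pvSet2, pvSet3, pvSet4, pvSet5, pvSet6]

theorem pvT6 (a b c d e f g : Int) (t : List Int) (a' b' c' d' e' f' g' : Int) (t' : List Int) :
    pvStepT (a::b::c::d::e::f::g::t) (a'::b'::c'::d'::e'::f'::g'::t') [0, (c * c' + c * d' + c * e' + c * f' + d * c' + d * d' + d * e' + d * f' + e * c' + e * d' + e * e' + e * f' + f * c' + f * d' + f * e' + f * f') % 1000000007, (b * b' + b * d' + b * e' + b * g' + d * b' + d * d' + d * e' + d * g' + e * b' + e * d' + e * e' + e * g' + g * b' + g * d' + g * e' + g * g') % 1000000007, (b * b' + b * c' + b * f' + b * g' + c * b' + c * c' + c * f' + c * g' + f * b' + f * c' + f * f' + f * g' + g * b' + g * c' + g * f' + g * g') % 1000000007, (b * b' + b * c' + b * f' + b * g' + c * b' + c * c' + c * f' + c * g' + f * b' + f * c' + f * f' + f * g' + g * b' + g * c' + g * f' + g * g') % 1000000007, (b * b' + b * d' + b * e' + b * g' + d * b' + d * d' + d * e' + d * g' + e * b' + e *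 d' + e * e' + e * g' + g * b' + g * d' + g * e' + g * g') % 1000000007, 0] 6 = [0, (c * c' + c * d' + c * e' + c * f' + d * c' + d * d' + d * e' + d * f' + e * c' + e * d' + e * e' + e * f' + f * c' + f * d' + f * e' + f * f') % 1000000007, (b * b' + b * d' + b * e' + b * g' + d * b' + d * d' + d * e' + d * g' + e * b' + e * d' + e * e' + e * g' + g * b' + g * d' + g * e' + g * g') % 1000000007, (b * b' + b * c' + b * f' + b * g' + c * b' + c * c' + c * f' + c * g' + f * b' + f * c' + f * f' + f * g' + g * b' + g * c' + g * f' + g * g') % 1000000007, (b * b' + b * c' + b * f' + b * g' + c * b' + c * c' + c * f' + c * g' + f * b' + f * c' + f * f' + f * g' + g * b' + g * c' + g * f' + g * g') % 1000000007, (b * b' + b * d' + b * e' + b * g' + d * b' + d * d' + d * e' + d * g' + e * b' + e * d' + e * e' + e * g' + g * b' + g * d' + g * e' + g * g') % 1000000007, (c * c' + c * d' + c * e' + c * f' + d * c' + d * d' + d * e' + d * f' + e * c' + e * d' + e * e' + e * f' + f * c' + f * d' + f * e' + f * f') % 1000000007] := by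
  unfold pvStepT
  norm_num [pv_range16, pvGet1, pvGet2, pvGet3, pvGet4, pvGet5, pvGet6,
    pvSet1, pvSet2, pvSet3, pvSet4, pvSet5, pvSet6]

theorem pvS1 (a b c d e f g : Int) (t : List Int) :
    pvStepS (a::b::c::d::e::f::g::t) [0, 0, 0, 0, 0, 0, 0] 1 = [0, (c + d + e + f) % 1000000007, 0, 0, 0, 0, 0] := by
  unfold pvStepS
  norm_num [pv_range16, pvGet1, pvGet2, pvGet3, pvGet4, pvGet5, pvGet6,
    pvSet1, pvSet2, pvSet3, pvSet4, pvSet5, pvSet6]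

theorem pvS2 (a b c d e f g : Int) (t : List Int) :
    pvStepS (a::b::c::d::e::f::g::t) [0, (c + d + e + f) % 1000000007, 0, 0, 0, 0, 0] 2 = [0, (c + d + e + f) % 1000000007, (b + d + e + g) % 1000000007, 0, 0, 0, 0] := by
  unfold pvStepS
  norm_num [pv_range16, pvGet1, pvGet2, pvGet3, pvGet4, pvGet5, pvGet6,
    pvSet1, pvSet2, pvSet3, pvSet4, pvSet5, pvSet6]

theorem pvS3 (a b c d e f g : Int) (t : List Int) :
    pvStepS (a::b::c::d::e::f::g::t) [0, (c + d + e + f) % 1000000007, (b + d + e + g) % 1000000007, 0, 0, 0, 0] 3 = [0, (c + d + e + f) % 1000000007, (b + d + e + g) % 1000000007, (b + c + f + g) % 1000000007, 0, 0, 0] := by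
  unfold pvStepS
  norm_num [pv_range16, pvGet1, pvGet2, pvGet3, pvGet4, pvGet5, pvGet6,
    pvSet1, pvSet2, pvSet3, pvSet4, pvSet5, pvSet6]

theorem pvS4 (a b c d e f g : Int) (t : List Int) :
    pvStepS (a::b::c::d::e::f::g::t) [0, (c + d + e + f) % 1000000007, (b + d + e + g) % 1000000007, (b + c + f + g) % 1000000007, 0, 0, 0] 4 = [0, (c + d + e + f) % 1000000007, (b + d + e + g) % 1000000007, (b + c + f + g) % 1000000007, (b + c + f + g) % 1000000007, 0, 0] := by
  unfold pvStepS
  norm_num [pv_range16, pvGet1, pvGet2, pvGet3, pvGet4, pvGet5, pvGet6,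
    pvSet1, pvSet2, pvSet3, pvSet4, pvSet5, pvSet6]

theorem pvS5 (a b c d e f g : Int) (t : List Int) :
    pvStepS (a::b::c::d::e::f::g::t) [0, (c + d + e + f) % 1000000007, (b + d + e + g) % 1000000007, (b + c + f + g) % 1000000007, (b + c + f + g) % 1000000007, 0, 0] 5 = [0, (c + d + e + f) % 1000000007, (b + d + e + g) % 1000000007, (b + c + f + g) % 1000000007, (b + c + f + g) % 1000000007, (b + d + e + g) % 1000000007, 0] := by
  unfold pvStepS
  norm_num [pv_range16, pvGet1, pvGet2, pvGet3, pvGet4, pvGet5, pvGet6,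
    pvSet1, pvSet2, pvSet3, pvSet4, pvSet5, pvSet6]

theorem pvS6 (a b c d e f g : Int) (t : List Int) :
    pvStepS (a::b::c::d::e::f::g::t) [0, (c + d + e + f) % 1000000007, (b + d + e + g) % 1000000007, (b + c + f + g) % 1000000007, (b + c + f + g) % 1000000007, (b + d + e + g) % 1000000007, 0] 6 = [0, (c + d + e + f) % 1000000007, (b + d + e + g) % 1000000007, (b + c + f + g) % 1000000007, (b + c + f + g) % 1000000007, (b + d + e + g) % 1000000007, (c + d + e + f) % 1000000007] := by
  unfold pvStepS
  norm_num [pv_range16, pvGet1, pvGet2, pvGet3, pvGet4, pvGet5, pvGet6,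
    pvSet1, pvSet2, pvSet3, pvSet4, pvSet5, pvSet6]


set_option maxHeartbeats 1000000 in
set_option maxRecDepth 16384 in
theorem pvBranchT (a b c d e f g : Int) (t : List Int) (a' b' c' d' e' f' g' : Int) (t' : List Int) :
    par_val (some (a::b::c::d::e::f::g::t)) (some (a'::b'::c'::d'::e'::f'::g'::t')) = par_val_alt (some (a::b::c::d::e::f::g::t)) (some (a'::b'::c'::d'::e'::f'::g'::t')) := by
  have hA : par_val (some (a::b::c::d::e::f::g::t)) (some (a'::b'::c'::d'::e'::f'::g'::t'))
      = List.foldl (pvStepT (a::b::c::d::e::f::g::t) (a'::b'::c'::d'::e'::f'::g'::t'))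
          ((PySem.List.pyRange 0 7 1).map fun _ => (0 : Int)) (PySem.List.pyRange 1 7 1) := by
    unfold par_val
    rw [if_neg (by simp), if_neg (by simp)]
    rfl
  have hB : par_val_alt (some (a::b::c::d::e::f::g::t)) (some (a'::b'::c'::d'::e'::f'::g'::t')) = [0, (c + (d + (e + (f)))) % 1000000007 * ((c' + (d' + (e' + (f')))) % 1000000007) % 1000000007, (b + (d + (e + (g)))) % 1000000007 * ((b' + (d' + (e' + (g')))) % 1000000007) % 1000000007, (b + (c + (f + (g)))) % 1000000007 * ((b' + (c' + (f' + (g')))) % 1000000007) % 1000000007, (b + (c + (f + (g)))) % 1000000007 * ((b' + (c' + (f' + (g')))) % 1000000007) % 1000000007, (b + (d + (e + (g)))) % 1000000007 * ((b' + (d' + (e' + (g')))) % 1000000007) % 1000000007, (c + (d + (e + (f)))) % 1000000007 * ((c' + (d' + (e' + (f')))) % 1000000007) % 1000000007] := by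
    unfold par_val_alt pvAllowedSum
    rw [if_neg (by simp), if_neg (by simp)]
    norm_num [pv_range16, pvGet1, pvGet2, pvGet3, pvGet4, pvGet5, pvGet6]
  rw [hA, hB, pv_range16, pv_ret0]
  simp only [List.foldl_cons, List.foldl_nil]
  rw [pvT1, pvT2, pvT3, pvT4, pvT5, pvT6]
  simp only [List.cons.injEq, true_and, and_true]
  refine ⟨?_, ?_, ?_, ?_, ?_, ?_⟩
  · rw [← Int.mul_emod]; congr 1; ring
  · rw [← Int.mul_emod]; congr 1; ring
  · rw [← Int.mul_emod]; congr 1; ring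
  · rw [← Int.mul_emod]; congr 1; ring
  · rw [← Int.mul_emod]; congr 1; ring
  · rw [← Int.mul_emod]; congr 1; ring

set_option maxHeartbeats 1000000 in
set_option maxRecDepth 16384 in
theorem pvBranchS1 (a b c d e f g : Int) (t : List Int) :
    par_val (some (a::b::c::d::e::f::g::t)) none = par_val_alt (some (a::b::c::d::e::f::g::t)) none := by
  have hA : par_val (some (a::b::c::d::e::f::g::t)) none
      = List.foldl (pvStepS (a::b::c::d::e::f::g::t))
          ((PySem.List.pyRange 0 7 1).map fun _ => (0 : Int)) (PySem.List.pyRange 1 7 1) := by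
    unfold par_val
    rw [if_neg (by simp), if_pos (by simp)]
    rfl
  have hB : par_val_alt (some (a::b::c::d::e::f::g::t)) none = [0, (c + (d + (e + (f)))) % 1000000007, (b + (d + (e + (g)))) % 1000000007, (b + (c + (f + (g)))) % 1000000007, (b + (c + (f + (g)))) % 1000000007, (b + (d + (e + (g)))) % 1000000007, (c + (d + (e + (f)))) % 1000000007] := by
    unfold par_val_alt pvAllowedSum
    rw [if_neg (by simp), if_pos (by simp)]
    norm_num [pv_range16, pvGet1, pvGet2, pvGet3, pvGet4, pvGet5, pvGet6]
  rw [hA, hB, pv_range16, pv_ret0]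
  simp only [List.foldl_cons, List.foldl_nil]
  rw [pvS1, pvS2, pvS3, pvS4, pvS5, pvS6]
  simp only [List.cons.injEq, true_and, and_true]
  refine ⟨?_, ?_, ?_, ?_, ?_, ?_⟩
  · omega
  · omega
  · omega
  · omega
  · omega
  · omega

set_option maxHeartbeats 1000000 in
set_option maxRecDepth 16384 in
theorem pvBranchS2 (a b c d e f g : Int) (t : List Int) :
    par_val none (some (a::b::c::d::e::f::g::t)) = par_val_alt none (some (a::b::c::d::e::f::g::t)) := by
  have hA : par_val none (some (a::b::c::d::e::f::g::t))
      = List.foldl (pvStepS (a::b::c::d::e::f::g::t))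
          ((PySem.List.pyRange 0 7 1).map fun _ => (0 : Int)) (PySem.List.pyRange 1 7 1) := by
    unfold par_val
    rw [if_neg (by simp), if_pos (by simp)]
    rfl
  have hB : par_val_alt none (some (a::b::c::d::e::f::g::t)) = [0, (c + (d + (e + (f)))) % 1000000007, (b + (d + (e + (g)))) % 1000000007, (b + (c + (f + (g)))) % 1000000007, (b + (c + (f + (g)))) % 1000000007, (b + (d + (e + (g)))) % 1000000007, (c + (d + (e + (f)))) % 1000000007] := by
    unfold par_val_alt pvAllowedSum
    rw [if_neg (by simp), if_pos (by simp), if_neg (by simp)]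
    norm_num [pv_range16, pvGet1, pvGet2, pvGet3, pvGet4, pvGet5, pvGet6]
  rw [hA, hB, pv_range16, pv_ret0]
  simp only [List.foldl_cons, List.foldl_nil]
  rw [pvS1, pvS2, pvS3, pvS4, pvS5, pvS6]
  simp only [List.cons.injEq, true_and, and_true]
  refine ⟨?_, ?_, ?_, ?_, ?_, ?_⟩
  · omega
  · omega
  · omega
  · omega
  · omega
  · omega

theorem pvBranchNN : par_val none none = par_val_alt none none := by decide

-- ===== VERDICT (by name: the statement is the Claim_ definition above) =====
theorem par_val_spec : Claim_equal_par_val := by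
  intro node1 node2 _ hpre
  unfold Spec_par_val
  cases node1 with
  | none =>
    cases node2 with
    | none => exact pvBranchNN
    | some l2 =>
      obtain ⟨a, b, c, d, e, f, g, t, rfl⟩ := pv_exists7 (hpre.2 l2 rfl)
      exact pvBranchS2 a b c d e f g t
  | some l1 =>
    cases node2 with
    | none =>
      obtain ⟨a, b, c, d, e, f, g, t, rfl⟩ := pv_exists7 (hpre.1 l1 rfl)
      exact pvBranchS1 a b c d e f g t
    | some l2 =>
      obtain ⟨a, b, c, d, e, f, g, t, rfl⟩ := pv_exists7 (hpre.1 l1 rfl)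
      obtain ⟨a', b', c', d', e', f', g', t', rfl⟩ := pv_exists7 (hpre.2 l2 rfl)
      exact pvBranchT a b c d e f g t a' b' c' d' e' f' g' t'
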